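-- pv_equiv track=rewrite | github.com/aur0ra29/optimization3 | main.py | fi
-- ===== SOURCE A (Python) =====
-- def fi(matrix):
--     # Find the cell with the smallest value in the matrix
--     if not matrix or not matrix[0]:
--         return None  # Empty matrix
--
--     min_v = float('inf')
--     min_c = None
--
--     # Iterate through each element in the matrix
--     ok = 0
--     for i, row in enumerate(matrix):
--         for j, value in enumerate(row):
--             if (value < 0):
--                 ok = 1
--             # Check if the current value is smaller than the current minimum
--             if value < min_v:
--                 min_v = value
--                 min_c = (i, j)
--
--     return min_c, ok
-- ===== SOURCE B (Python) =====
-- def fi(matrix):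
--     # Row-summary reduction: collapse each nonempty row to (i, argmin_j, min_v),
--     # derive the negative flag from the row minima, then reduce the summaries once.
--     if not matrix or not matrix[0]:
--         return None  # Empty matrix
--     summaries = []
--     for i, row in enumerate(matrix):
--         if row:
--             j, v = min(enumerate(row), key=lambda q: q[1])
--             summaries.append((i, j, v))
--     ok = 1 if any(v < 0 for _, _, v in summaries) else 0
--     i, j, v = min(summaries, key=lambda t: t[2])
--     return (i, j), ok
-- ===== Notes on version B (the rewrite author's own statement) =====
-- stated objective: alternative
-- what changed: Replaces A's single stateful nested scan over every cell with a map-reduce decomposition: each nonempty row is first collapsed to a (row, argmin, min) summary, the negative-present flag is derived from the row minima alone (a row contains a negative iff its minimum is negative), and one final reduction over the summaries picks the global first minimum.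
import Mathlib
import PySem

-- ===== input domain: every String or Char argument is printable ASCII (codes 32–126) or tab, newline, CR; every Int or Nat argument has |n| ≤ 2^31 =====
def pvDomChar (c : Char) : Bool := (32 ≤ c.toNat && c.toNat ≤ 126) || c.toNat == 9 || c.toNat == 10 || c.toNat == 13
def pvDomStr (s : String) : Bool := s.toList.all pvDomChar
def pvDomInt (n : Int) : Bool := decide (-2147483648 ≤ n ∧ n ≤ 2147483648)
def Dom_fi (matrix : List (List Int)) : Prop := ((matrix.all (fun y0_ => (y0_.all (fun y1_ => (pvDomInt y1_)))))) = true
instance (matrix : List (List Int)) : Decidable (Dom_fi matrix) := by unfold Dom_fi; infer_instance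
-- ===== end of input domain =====

-- B replaces A's single stateful nested scan by a map-reduce decomposition: each nonempty row is
-- collapsed to a (row, argmin, min) summary, the negative flag is read off the row minima, and one
-- reduction over the summaries picks the global first minimum; same return value, same O(n*m) cost.

-- ===== PORT A =====
-- state = (min_v : Option Int  [none = float('inf')], min_c : Option (Int × Int), ok : Int)
def fi (matrix : List (List Int)) : Option ((Int × Int) × Int) :=
  if matrix = [] ∨ matrix.headD [] = [] then none
  else
    let st :=
      (PySem.List.enumerate matrix 0).foldl
        (fun st p =>
          (PySem.List.enumerate p.2 0).foldl
            (fun st q =>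
              let ok : Int := if q.2 < 0 then 1 else st.2.2
              if (match st.1 with | none => true | some m => decide (q.2 < m)) then
                (some q.2, some (p.1, q.1), ok)
              else (st.1, st.2.1, ok))
            st)
        ((none : Option Int), (none : Option (Int × Int)), (0 : Int))
    -- Python returns the pair (min_c, ok); min_c = None is unreachable past the guard,
    -- so the port returns none there (no value of the type exists for (None, ok)).
    match st.2.1 with
    | some c => some (c, st.2.2)
    | none => none

-- ===== PORT B =====
def fi_alt (matrix : List (List Int)) : Option ((Int × Int) × Int) :=
  if matrix = [] ∨ matrix.headD [] = [] then none
  else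
    let summaries := (PySem.List.enumerate matrix 0).foldl
      (fun acc p =>
        if p.2 = [] then acc
        else
          -- Python's min raises on an empty iterable; guarded by 'if row', none is unreachable.
          match PySem.List.min? (PySem.List.enumerate p.2 0) (fun q => q.2) with
          | some jv => acc ++ [(p.1, jv.1, jv.2)]
          | none => acc)
      ([] : List (Int × Int × Int))
    let ok : Int := if summaries.any (fun t => decide (t.2.2 < 0)) then 1 else 0
    -- min over summaries: nonempty past the guard, none unreachable.
    match PySem.List.min? summaries (fun t => t.2.2) with
    | some t => some ((t.1, t.2.1), ok)
    | none => none

-- ===== PRECONDITION & SPEC =====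
def Spec_fi (matrix : List (List Int)) (out : Option ((Int × Int) × Int)) : Prop := out = fi_alt matrix
instance (matrix : List (List Int)) (out : Option ((Int × Int) × Int)) : Decidable (Spec_fi matrix out) := by unfold Spec_fi; infer_instance

-- ===== CLAIM (what is proved, stated in full; the proofs are below) =====
def Claim_equal_fi : Prop := ∀ (matrix : List (List Int)), Dom_fi matrix → Spec_fi matrix (fi matrix)

-- ===== LEMMAS AND PROOFS =====

-- A's cell-level step function (what A's nested loops do to one cell after flattening)
def stepA (st : Option Int × Option (Int × Int) × Int) (t : Int × Int × Int) :
    Option Int × Option (Int × Int) × Int :=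
  let ok : Int := if t.2.2 < 0 then 1 else st.2.2
  if (match st.1 with | none => true | some m => decide (t.2.2 < m)) then
    (some t.2.2, some (t.1, t.2.1), ok)
  else (st.1, st.2.1, ok)

-- the first-min fold step on cells (the step of PySem.List.min? with key ·.2.2)
def stepM (acc : Option (Int × Int × Int)) (t : Int × Int × Int) : Option (Int × Int × Int) :=
  match acc with
  | none => some t
  | some m => if t.2.2 < m.2.2 then some t else some m

-- the same step on (index, value) pairs with key ·.2
def stepN (acc : Option (Int × Int)) (q : Int × Int) : Option (Int × Int) :=
  match acc with
  | none => some q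
  | some m => if q.2 < m.2 then some q else some m

-- cells of one enumerated row, and its summary list (empty for an empty row)
def cellsRow (p : Int × List Int) : List (Int × Int × Int) :=
  (PySem.List.enumerate p.2 0).map (fun q => (p.1, q.1, q.2))

def sumF (p : Int × List Int) : List (Int × Int × Int) :=
  if p.2 = [] then []
  else
    match PySem.List.min? (PySem.List.enumerate p.2 0) (fun q => q.2) with
    | some jv => [(p.1, jv.1, jv.2)]
    | none => []

theorem min?_eq_foldl_stepM (l : List (Int × Int × Int)) :
    PySem.List.min? l (fun t => t.2.2) = l.foldl stepM none := by
  unfold PySem.List.min?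
  apply PySem.List.foldl_congr_mem
  intro acc x _; cases acc <;> rfl

theorem min?_eq_foldl_stepN (l : List (Int × Int)) :
    PySem.List.min? l (fun q => q.2) = l.foldl stepN none := by
  unfold PySem.List.min?
  apply PySem.List.foldl_congr_mem
  intro acc x _; cases acc <;> rfl

theorem stepM_assoc (acc : Option (Int × Int × Int)) (t m : Int × Int × Int) :
    stepM (stepM acc t) m = stepM acc (if m.2.2 < t.2.2 then m else t) := by
  cases acc with
  | none =>
    by_cases h : m.2.2 < t.2.2 <;> simp [stepM, h]
  | some a =>
    by_cases h1 : t.2.2 < a.2.2 <;> by_cases h2 : m.2.2 < t.2.2 <;>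
      simp only [stepM, if_pos, if_neg, h1, h2, if_true, if_false] <;>
      split_ifs <;> first | rfl | omega

-- restarting the first-min fold: fold from acc = combine acc with the fold from none
theorem foldl_stepM_restart (l : List (Int × Int × Int)) :
    ∀ acc, l.foldl stepM acc = (l.foldl stepM none).elim acc (stepM acc) := by
  induction l with
  | nil => intro acc; simp
  | cons t l ih =>
    intro acc
    simp only [List.foldl_cons, show stepM none t = some t from rfl, ih (stepM acc t), ih (some t)]
    cases h : l.foldl stepM none with
    | none => rfl
    | some m =>
      simp only [Option.elim]
      rw [stepM_assoc]
      by_cases h : m.2.2 < t.2.2 <;> simp [stepM, h]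

-- mapping a row's (j, v) pairs to cells commutes with the first-min fold
theorem foldl_stepM_map (i : Int) (l : List (Int × Int)) :
    ∀ acc : Option (Int × Int),
      (l.map (fun q => (i, q.1, q.2))).foldl stepM (acc.map (fun jv => (i, jv.1, jv.2)))
        = (l.foldl stepN acc).map (fun jv => (i, jv.1, jv.2)) := by
  induction l with
  | nil => intro acc; simp
  | cons q l ih =>
    intro acc
    simp only [List.map_cons, List.foldl_cons]
    have : stepM (acc.map (fun jv => (i, jv.1, jv.2))) (i, q.1, q.2)
        = (stepN acc q).map (fun jv => (i, jv.1, jv.2)) := by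
      cases acc with
      | none => rfl
      | some m => simp only [stepM, stepN, Option.map_some]; split_ifs <;> rfl
    rw [this, ih (stepN acc q)]

-- enumerate is empty iff the list is empty
theorem enumerate_eq_nil_iff (xs : List Int) (s : Int) :
    PySem.List.enumerate xs s = [] ↔ xs = [] := by
  constructor
  · intro h
    have := PySem.List.map_snd_enumerate xs s
    rw [h] at this; simpa using this.symm
  · intro h; subst h; rfl

-- one row's cells fold exactly like its summary
theorem row_fold (p : Int × List Int) (acc : Option (Int × Int × Int)) :
    (cellsRow p).foldl stepM acc = (sumF p).foldl stepM acc := by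
  by_cases hp : p.2 = []
  · simp [cellsRow, sumF, hp, show PySem.List.enumerate ([] : List Int) 0 = [] from rfl]
  · have hne : PySem.List.enumerate p.2 0 ≠ [] := by
      intro h; exact hp ((enumerate_eq_nil_iff p.2 0).mp h)
    cases hm : PySem.List.min? (PySem.List.enumerate p.2 0) (fun q => q.2) with
    | none => exact absurd ((PySem.List.min?_eq_none_iff _ _).mp hm) hne
    | some jv =>
      have hcells : (cellsRow p).foldl stepM none = some (p.1, jv.1, jv.2) := by
        have := foldl_stepM_map p.1 (PySem.List.enumerate p.2 0) none
        simp only [Option.map_none] at this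
        rw [cellsRow, this, ← min?_eq_foldl_stepN, hm]; rfl
      rw [foldl_stepM_restart, hcells, sumF, if_neg hp, hm]
      rfl

-- lists that fold equally rowwise fold equally after flattening
theorem foldl_flatMap_congr (rows : List (Int × List Int)) :
    ∀ acc, ((rows.flatMap cellsRow).foldl stepM acc) = ((rows.flatMap sumF).foldl stepM acc) := by
  induction rows with
  | nil => intro acc; rfl
  | cons p rows ih =>
    intro acc
    simp only [List.flatMap_cons, List.foldl_append]
    rw [row_fold p acc, ih]

-- the summaries loop builds exactly the flatMap of sumF
theorem summaries_eq_flatMap (rows : List (Int × List Int)) :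
    rows.foldl
      (fun acc p =>
        if p.2 = [] then acc
        else
          match PySem.List.min? (PySem.List.enumerate p.2 0) (fun q => q.2) with
          | some jv => acc ++ [(p.1, jv.1, jv.2)]
          | none => acc)
      ([] : List (Int × Int × Int)) = rows.flatMap sumF := by
  have h2 : rows.foldl
      (fun acc p =>
        if p.2 = [] then acc
        else
          match PySem.List.min? (PySem.List.enumerate p.2 0) (fun q => q.2) with
          | some jv => acc ++ [(p.1, jv.1, jv.2)]
          | none => acc)
      ([] : List (Int × Int × Int))
      = rows.foldl (fun acc x => acc ++ sumF x) ([] : List (Int × Int × Int)) := by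
    apply PySem.List.foldl_congr_mem
    intro acc p _
    by_cases hp : p.2 = []
    · simp [sumF, hp]
    · cases hm : PySem.List.min? (PySem.List.enumerate p.2 0) (fun q => q.2) with
      | none =>
        exact absurd ((PySem.List.min?_eq_none_iff _ _).mp hm)
          (fun h => hp ((enumerate_eq_nil_iff p.2 0).mp h))
      | some jv => simp [sumF, hp, hm]
  rw [h2, PySem.List.foldl_append_eq_flatMap, List.nil_append]

-- main invariant for A: the combined fold is the first-min fold plus the any-negative flag
theorem foldA_eq (cs : List (Int × Int × Int)) :
    ∀ (acc : Option (Int × Int × Int)) (ok0 : Int),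
      cs.foldl stepA (acc.map (·.2.2), acc.map (fun t => (t.1, t.2.1)), ok0)
        = ((cs.foldl stepM acc).map (·.2.2), (cs.foldl stepM acc).map (fun t => (t.1, t.2.1)),
            if cs.any (fun t => decide (t.2.2 < 0)) then 1 else ok0) := by
  induction cs with
  | nil => intro acc ok0; simp
  | cons t cs ih =>
    intro acc ok0
    have hok : ∀ b : Int,
        (if cs.any (fun t => decide (t.2.2 < 0)) then 1 else (if t.2.2 < 0 then (1:Int) else b))
          = (if (t.2.2 < 0 ∨ cs.any (fun t => decide (t.2.2 < 0)) = true) then 1 else b) := by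
      intro b; by_cases h1 : cs.any (fun t => decide (t.2.2 < 0)) = true <;>
        by_cases h2 : t.2.2 < 0 <;> simp [h1, h2]
    cases acc with
    | none =>
      simp only [List.foldl_cons, List.any_cons, Bool.or_eq_true, decide_eq_true_eq]
      have : stepA (none, none, ok0) t
          = ((some t).map (·.2.2), (some t).map (fun t => (t.1, t.2.1)),
              if t.2.2 < 0 then (1:Int) else ok0) := by
        simp [stepA]
      rw [show (Option.map (·.2.2) (none : Option (Int×Int×Int)), Option.map (fun t => (t.1,t.2.1)) (none : Option (Int×Int×Int)), ok0) = ((none : Option Int), (none : Option (Int×Int)), ok0) by simp,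
          this, ih (some t), show stepM none t = some t from rfl, hok]
    | some a =>
      simp only [List.foldl_cons, List.any_cons, Bool.or_eq_true, decide_eq_true_eq]
      by_cases hlt : t.2.2 < a.2.2
      · have : stepA ((some a).map (·.2.2), (some a).map (fun t => (t.1, t.2.1)), ok0) t
            = ((some t).map (·.2.2), (some t).map (fun t => (t.1, t.2.1)),
                if t.2.2 < 0 then (1:Int) else ok0) := by
          simp [stepA, hlt]
        rw [this, ih (some t), show stepM (some a) t = some t by simp [stepM, hlt], hok]
      · have : stepA ((some a).map (·.2.2), (some a).map (fun t => (t.1, t.2.1)), ok0) t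
            = ((some a).map (·.2.2), (some a).map (fun t => (t.1, t.2.1)),
                if t.2.2 < 0 then (1:Int) else ok0) := by
          simp [stepA, hlt]
        rw [this, ih (some a), show stepM (some a) t = some a by simp [stepM, hlt], hok]

-- the any-negative flag through enumerate
theorem any_enum_snd {α : Type} (l : List α) (s : Int) (p : α → Bool) :
    (PySem.List.enumerate l s).any (fun q => p q.2) = l.any p := by
  conv_rhs => rw [← PySem.List.map_snd_enumerate l s]
  rw [List.any_map]
  rfl

theorem any_cells_eq (matrix : List (List Int)) :
    (((PySem.List.enumerate matrix 0).flatMap cellsRow).any (fun t => decide (t.2.2 < 0)))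
      = matrix.any (fun row => row.any (fun v => decide (v < 0))) := by
  rw [List.any_flatMap]
  have h1 : ∀ p : Int × List Int,
      (cellsRow p).any (fun t => decide (t.2.2 < 0)) = p.2.any (fun v => decide (v < 0)) := by
    intro p
    rw [cellsRow, List.any_map]
    exact any_enum_snd p.2 0 (fun v => decide (v < 0))
  simp only [h1]
  exact any_enum_snd matrix 0 (fun row => row.any (fun v => decide (v < 0)))

-- a row contains a negative iff its minimum is negative
theorem any_sumF_eq (p : Int × List Int) :
    (sumF p).any (fun t => decide (t.2.2 < 0)) = p.2.any (fun v => decide (v < 0)) := by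
  by_cases hp : p.2 = []
  · simp [sumF, hp]
  · cases hm : PySem.List.min? (PySem.List.enumerate p.2 0) (fun q => q.2) with
    | none =>
      exact absurd ((PySem.List.min?_eq_none_iff _ _).mp hm)
        (fun h => hp ((enumerate_eq_nil_iff p.2 0).mp h))
    | some jv =>
      have hsum : sumF p = [(p.1, jv.1, jv.2)] := by rw [sumF, if_neg hp, hm]
      rw [hsum, Bool.eq_iff_iff]
      simp only [List.any_cons, List.any_nil, Bool.or_false, List.any_eq_true,
        decide_eq_true_eq]
      constructor
      · intro h
        have hmem := PySem.List.min?_mem hm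
        rw [PySem.List.mem_enumerate_iff] at hmem
        obtain ⟨k, hk, hjv⟩ := hmem
        refine ⟨p.2[k], List.getElem_mem hk, ?_⟩
        rw [hjv] at h
        exact h
      · rintro ⟨v, hv, hneg⟩
        obtain ⟨q, hq, hq2⟩ : ∃ q ∈ PySem.List.enumerate p.2 0, q.2 = v := by
          have hv' : v ∈ (PySem.List.enumerate p.2 0).map (fun x => x.2) := by
            rw [PySem.List.map_snd_enumerate]; exact hv
          obtain ⟨q, hq, hq2⟩ := List.mem_map.mp hv'
          exact ⟨q, hq, hq2⟩
        have hle : jv.2 ≤ q.2 := PySem.List.min?_isMin hm q hq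
        omega

theorem any_summaries_eq (matrix : List (List Int)) :
    (((PySem.List.enumerate matrix 0).flatMap sumF).any (fun t => decide (t.2.2 < 0)))
      = matrix.any (fun row => row.any (fun v => decide (v < 0))) := by
  rw [List.any_flatMap]
  simp only [any_sumF_eq]
  exact any_enum_snd matrix 0 (fun row => row.any (fun v => decide (v < 0)))

-- ===== VERDICT (by name: the statement is the Claim_ definition above) =====
theorem fi_spec : Claim_equal_fi := by
  intro matrix _
  unfold Spec_fi fi fi_alt
  by_cases hg : matrix = [] ∨ matrix.headD [] = []
  · rw [if_pos hg, if_pos hg]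
  · rw [if_neg hg, if_neg hg]
    set rows := PySem.List.enumerate matrix 0 with hrows
    have hA : rows.foldl
        (fun st p =>
          (PySem.List.enumerate p.2 0).foldl
            (fun st q =>
              let ok : Int := if q.2 < 0 then 1 else st.2.2
              if (match st.1 with | none => true | some m => decide (q.2 < m)) then
                (some q.2, some (p.1, q.1), ok)
              else (st.1, st.2.1, ok))
            st)
        ((none : Option Int), (none : Option (Int × Int)), (0 : Int))
        = (rows.flatMap cellsRow).foldl stepA ((none : Option Int), (none : Option (Int × Int)), (0 : Int)) := by
      rw [List.foldl_flatMap]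
      apply PySem.List.foldl_congr_mem
      intro st p _
      rw [cellsRow, List.foldl_map]
      rfl
    rw [hA, summaries_eq_flatMap rows]
    have := foldA_eq (rows.flatMap cellsRow) none 0
    simp only [Option.map_none] at this
    rw [this, foldl_flatMap_congr rows none, ← min?_eq_foldl_stepM, hrows, any_cells_eq]
    simp only [any_summaries_eq]
    cases hm : PySem.List.min? ((PySem.List.enumerate matrix 0).flatMap sumF) (fun t => t.2.2) <;>
      simp [hm]
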